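-- pv_equiv track=rewrite | github.com/lgabs/ClassicComputerScienceProblemsInPython | chapter3/exercise_1.py | satisfied
-- ===== SOURCE A (Python) =====
-- from typing import Coroutine, NamedTuple, List, Dict, Optional, Set
--
-- class GridLocation(NamedTuple):
--     row: int
--     column: int
--
-- def satisfied(assignment: Dict[str, List[GridLocation]]) -> bool:
--     # previously, we were only checking if the set of locations do not overlap
--     # Now, if the sums of separate sets' length per letter differ from
--     # their joint length, that's because we have duplicate locations
--     # for different letters, which is conflit
--     letters_map: Dict[str, Set[GridLocation]] = {}
--     for word, locations in assignment.items():
--         for letter, location in zip(word, locations):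
--             if letter not in letters_map:
--                 letters_map[letter] = {location}
--             else:
--                 letters_map[letter].add(location)
--     separate_sums_len: int = sum(
--         [len(v) for v in letters_map.values()]
--     )  # sum of sets' lenght
--     jointed_sum_len: int = len(
--         list(set().union(*letters_map.values()))
--     )  # join all sets before taking length
--
--     return (
--         separate_sums_len == jointed_sum_len
--     )  # if sums match, we do not have conflits
-- ===== SOURCE B (Python) =====
-- from typing import Dict, List, NamedTuple
--
-- class GridLocation(NamedTuple):
--     row: int
--     column: int
--
-- def satisfied(assignment: Dict[str, List[GridLocation]]) -> bool:
--     # single location -> letter map with early exit on conflict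
--     placed: Dict[GridLocation, str] = {}
--     for word, locations in assignment.items():
--         for letter, location in zip(word, locations):
--             existing = placed.get(location)
--             if existing is None:
--                 placed[location] = letter
--             elif existing != letter:
--                 return False
--     return True
-- ===== Notes on version B (the rewrite author's own statement) =====
-- stated objective: simpler
-- what changed: B keeps one location-to-letter dict and returns False at the first location seen with two different letters, instead of A's grouping locations into per-letter sets and comparing the sum of set sizes against the size of their union.
import Mathlib
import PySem

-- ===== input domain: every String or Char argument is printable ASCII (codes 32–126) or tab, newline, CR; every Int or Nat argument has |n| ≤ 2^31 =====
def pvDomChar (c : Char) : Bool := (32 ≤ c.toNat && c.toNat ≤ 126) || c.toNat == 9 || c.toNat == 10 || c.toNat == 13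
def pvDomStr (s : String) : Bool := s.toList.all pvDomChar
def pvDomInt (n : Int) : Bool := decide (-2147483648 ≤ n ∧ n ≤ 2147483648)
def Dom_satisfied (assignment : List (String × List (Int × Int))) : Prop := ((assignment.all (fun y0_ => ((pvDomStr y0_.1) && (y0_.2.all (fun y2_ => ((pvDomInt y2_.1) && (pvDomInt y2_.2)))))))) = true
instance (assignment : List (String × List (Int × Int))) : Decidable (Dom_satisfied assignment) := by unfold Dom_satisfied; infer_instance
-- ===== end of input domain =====

-- B replaces A's per-letter sets and sum-vs-union count by a single location→letter
-- map with an early exit at the first conflicting letter (objective: simpler).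

-- ===== PORT A =====
-- body of A's inner loop: 'if letter not in letters_map: letters_map[letter] = {location}
-- else: letters_map[letter].add(location)'
def satA_step (m : PySem.Dict Char (PySem.Set (Int × Int))) (p : Char × (Int × Int)) :
    PySem.Dict Char (PySem.Set (Int × Int)) :=
  if m.contains p.1 = false then m.insert p.1 [p.2]
  else m.modify p.1 PySem.Set.empty (fun s => PySem.Set.add s p.2)

def satisfied (assignment : List (String × List (Int × Int))) : Bool :=
  -- for word, locations in assignment.items(): for letter, location in zip(word, locations): …
  let lettersMap :=
    (PySem.Dict.ofList assignment).items.foldl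
      (fun m wl => (wl.1.toList.zip wl.2).foldl satA_step m) PySem.Dict.empty
  -- separate_sums_len = sum([len(v) for v in letters_map.values()])
  let separate : Int := (lettersMap.values.map PySem.Set.len).sum
  -- jointed_sum_len = len(list(set().union(*letters_map.values())))
  let joint : Int :=
    PySem.Set.len (lettersMap.values.foldl (fun s v => PySem.Set.union s v) PySem.Set.empty)
  separate == joint

-- ===== PORT B =====
-- inner loop of B: walk the (letter, location) pairs of one word, none = conflict found
def satB_inner (m : PySem.Dict (Int × Int) Char) :
    List (Char × (Int × Int)) → Option (PySem.Dict (Int × Int) Char)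
  | [] => some m
  | p :: rest =>
    match m.get? p.2 with
    | none => satB_inner (m.insert p.2 p.1) rest
    | some c => if c = p.1 then satB_inner m rest else none

-- outer loop of B over assignment.items()
def satB_outer (m : PySem.Dict (Int × Int) Char) :
    List (String × List (Int × Int)) → Bool
  | [] => true
  | wl :: rest =>
    match satB_inner m (wl.1.toList.zip wl.2) with
    | none => false
    | some m' => satB_outer m' rest

def satisfied_alt (assignment : List (String × List (Int × Int))) : Bool :=
  satB_outer PySem.Dict.empty (PySem.Dict.ofList assignment).items

-- ===== PRECONDITION & SPEC =====
def Spec_satisfied (assignment : List (String × List (Int × Int))) (out : Bool) : Prop := out = satisfied_alt assignment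
instance (assignment : List (String × List (Int × Int))) (out : Bool) : Decidable (Spec_satisfied assignment out) := by unfold Spec_satisfied; infer_instance

-- ===== CLAIM (what is proved, stated in full; the proofs are below) =====
def Claim_equal_satisfied : Prop := ∀ (assignment : List (String × List (Int × Int))), Dom_satisfied assignment → Spec_satisfied assignment (satisfied assignment)

-- ===== LEMMAS AND PROOFS =====

-- the flat list of (letter, location) pairs both programs walk
def pvPairs (assignment : List (String × List (Int × Int))) : List (Char × (Int × Int)) :=
  (PySem.Dict.ofList assignment).items.flatMap (fun wl => wl.1.toList.zip wl.2)

-- "no two pairs place different letters at one location"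
def pvOk (ps : List (Char × (Int × Int))) : Prop :=
  ∀ p ∈ ps, ∀ q ∈ ps, p.2 = q.2 → p.1 = q.1

-- A's step in normalized 'modify' form
def stepM (m : PySem.Dict Char (PySem.Set (Int × Int))) (p : Char × (Int × Int)) :
    PySem.Dict Char (PySem.Set (Int × Int)) :=
  m.modify p.1 PySem.Set.empty (fun s => PySem.Set.add s p.2)

lemma satA_step_eq (m : PySem.Dict Char (PySem.Set (Int × Int))) (p : Char × (Int × Int)) :
    satA_step m p = stepM m p := by
  unfold satA_step stepM PySem.Dict.modify
  by_cases h : m.contains p.1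
  · simp [h]
  · have hcf : m.contains p.1 = false := by simpa using h
    rw [if_pos (by simp [hcf]), PySem.Dict.getD_of_not_contains m PySem.Set.empty hcf]
    simp [PySem.Set.empty]

-- ---------- B-side characterization ----------

lemma satB_inner_append (xs ys : List (Char × (Int × Int))) (m : PySem.Dict (Int × Int) Char) :
    satB_inner m (xs ++ ys) = (satB_inner m xs).bind (fun m' => satB_inner m' ys) := by
  induction xs generalizing m with
  | nil => simp [satB_inner]
  | cons p rest ih =>
    simp only [List.cons_append, satB_inner]
    cases h : m.get? p.2 with
    | none => simpa using ih _
    | some c =>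
      by_cases hc : c = p.1
      · simpa [hc] using ih _
      · simp [hc]

lemma satB_outer_eq_flat (items : List (String × List (Int × Int)))
    (m : PySem.Dict (Int × Int) Char) :
    satB_outer m items =
      (satB_inner m (items.flatMap (fun wl => wl.1.toList.zip wl.2))).isSome := by
  induction items generalizing m with
  | nil => simp [satB_outer, satB_inner]
  | cons wl rest ih =>
    simp only [satB_outer, List.flatMap_cons, satB_inner_append]
    cases h : satB_inner m (wl.1.toList.zip wl.2) with
    | none => simp
    | some m' => simpa using ih m'

lemma satB_inner_char (ps : List (Char × (Int × Int))) :
    ∀ m : PySem.Dict (Int × Int) Char,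
      ((satB_inner m ps).isSome = true ↔
        ((∀ p ∈ ps, ∀ c, m.get? p.2 = some c → c = p.1) ∧ pvOk ps)) := by
  induction ps with
  | nil => intro m; simp [satB_inner, pvOk]
  | cons p rest ih =>
    intro m
    cases h : m.get? p.2 with
    | none =>
      simp only [satB_inner, h]
      rw [ih]
      constructor
      · rintro ⟨hins, hok⟩
        refine ⟨?_, ?_⟩
        · intro q hq c hc
          rcases List.mem_cons.mp hq with hq' | hq'
          · subst hq'; rw [h] at hc; cases hc
          · by_cases hl : q.2 = p.2
            · rw [hl, h] at hc; cases hc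
            · refine hins q hq' c ?_
              rw [PySem.Dict.get?_insert, if_neg hl]; exact hc
        · have key : ∀ q ∈ rest, q.2 = p.2 → q.1 = p.1 := by
            intro q hq hl
            exact (hins q hq p.1 (by rw [PySem.Dict.get?_insert, if_pos hl])).symm
          intro a ha b hb hab
          rcases List.mem_cons.mp ha with ha' | ha' <;> rcases List.mem_cons.mp hb with hb' | hb'
          · subst ha'; subst hb'; rfl
          · subst ha'; exact (key b hb' (by rw [← hab])).symm
          · subst hb'; exact key a ha' hab
          · exact hok a ha' b hb' hab
      · rintro ⟨hm, hok⟩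
        refine ⟨?_, ?_⟩
        · intro q hq c hc
          rw [PySem.Dict.get?_insert] at hc
          by_cases hl : q.2 = p.2
          · rw [if_pos hl] at hc
            injection hc with hc; subst hc
            exact (hok p (by simp) q (by simp [hq]) hl.symm)
          · rw [if_neg hl] at hc
            exact hm q (by simp [hq]) c hc
        · intro a ha b hb hab
          exact hok a (by simp [ha]) b (by simp [hb]) hab
    | some c =>
      by_cases hc : c = p.1
      · subst hc
        simp only [satB_inner, h, if_true]
        rw [ih]
        constructor
        · rintro ⟨hm, hok⟩
          refine ⟨?_, ?_⟩
          · intro q hq c' hc'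
            rcases List.mem_cons.mp hq with hq' | hq'
            · subst hq'; rw [h] at hc'; injection hc' with hc'; exact hc'.symm
            · exact hm q hq' c' hc'
          · intro a ha b hb hab
            rcases List.mem_cons.mp ha with ha' | ha' <;> rcases List.mem_cons.mp hb with hb' | hb'
            · subst ha'; subst hb'; rfl
            · subst ha'; exact hm b hb' a.1 (by rw [← hab, h])
            · subst hb'; exact (hm a ha' b.1 (by rw [hab, h])).symm
            · exact hok a ha' b hb' hab
        · rintro ⟨hm, hok⟩
          exact ⟨fun q hq => hm q (by simp [hq]),
            fun a ha b hb hab => hok a (by simp [ha]) b (by simp [hb]) hab⟩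
      · simp only [satB_inner, h, if_neg hc]
        constructor
        · intro hf; exact absurd hf (by simp)
        · rintro ⟨hm, -⟩; exact absurd (hm p (by simp) c h) hc

lemma satisfied_alt_iff (assignment : List (String × List (Int × Int))) :
    satisfied_alt assignment = true ↔ pvOk (pvPairs assignment) := by
  rw [satisfied_alt, satB_outer_eq_flat, satB_inner_char]
  simp [pvPairs, PySem.Dict.get?_empty]

-- ---------- A-side characterization ----------

lemma mem_getD_foldl_stepM (ps : List (Char × (Int × Int))) :
    ∀ (d : PySem.Dict Char (PySem.Set (Int × Int))) (c : Char) (l : Int × Int),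
      (l ∈ (ps.foldl stepM d).getD c PySem.Set.empty ↔
        l ∈ d.getD c PySem.Set.empty ∨ (c, l) ∈ ps) := by
  induction ps with
  | nil => simp
  | cons p rest ih =>
    intro d c l
    obtain ⟨pc, pl⟩ := p
    simp only [List.foldl_cons, ih, stepM, PySem.Dict.getD_modify, List.mem_cons,
      Prod.mk.injEq]
    by_cases hcp : c = pc
    · subst hcp; simp only [if_true, PySem.Set.mem_add, true_and]; tauto
    · simp only [if_neg hcp]; tauto

lemma nodup_getD_foldl_stepM (ps : List (Char × (Int × Int))) :
    ∀ (d : PySem.Dict Char (PySem.Set (Int × Int))),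
      (∀ c, (d.getD c PySem.Set.empty).Nodup) →
      ∀ c, ((ps.foldl stepM d).getD c PySem.Set.empty).Nodup := by
  induction ps with
  | nil => intro d h c; simpa using h c
  | cons p rest ih =>
    intro d h c
    refine ih _ ?_ c
    intro c'
    simp only [stepM, PySem.Dict.getD_modify]
    by_cases hc : c' = p.1
    · rw [if_pos hc]; exact PySem.Set.nodup_add _ _ (h p.1)
    · rw [if_neg hc]; exact h c'

lemma mem_foldl_union (vs : List (PySem.Set (Int × Int))) :
    ∀ (s : PySem.Set (Int × Int)) (l : Int × Int),
      (l ∈ vs.foldl (fun s v => PySem.Set.union s v) s ↔ l ∈ s ∨ ∃ v ∈ vs, l ∈ v) := by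
  induction vs with
  | nil => simp
  | cons v rest ih =>
    intro s l
    simp only [List.foldl_cons, ih, PySem.Set.mem_union, List.mem_cons]
    constructor
    · rintro ((h | h) | ⟨w, hw, hl⟩)
      · exact Or.inl h
      · exact Or.inr ⟨v, Or.inl rfl, h⟩
      · exact Or.inr ⟨w, Or.inr hw, hl⟩
    · rintro (h | ⟨w, hw | hw, hl⟩)
      · exact Or.inl (Or.inl h)
      · subst hw; exact Or.inl (Or.inr hl)
      · exact Or.inr ⟨w, hw, hl⟩

lemma nodup_foldl_union (vs : List (PySem.Set (Int × Int))) :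
    ∀ (s : PySem.Set (Int × Int)), s.Nodup →
      (vs.foldl (fun s v => PySem.Set.union s v) s).Nodup := by
  induction vs with
  | nil => intro s h; simpa using h
  | cons v rest ih => intro s h; exact ih _ (PySem.Set.nodup_union _ _ h)

lemma satisfied_iff (assignment : List (String × List (Int × Int))) :
    satisfied assignment = true ↔ pvOk (pvPairs assignment) := by
  classical
  have hstep : satA_step = stepM := funext fun m => funext fun p => satA_step_eq m p
  set ps := pvPairs assignment with hps
  set m := ps.foldl stepM PySem.Dict.empty with hm
  have hfold :
      (PySem.Dict.ofList assignment).items.foldl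
        (fun m wl => (wl.1.toList.zip wl.2).foldl satA_step m) PySem.Dict.empty = m := by
    rw [hstep, hm, hps, pvPairs, List.foldl_flatMap]
  have hK : m.keys = PySem.Set.ofList (ps.map (·.1)) := by
    have h := PySem.Dict.keys_foldl_modify_key ps (fun p => p.1) PySem.Set.empty
      (fun _ p => (fun s => PySem.Set.add s p.2)) PySem.Dict.empty
    rw [hm]
    simpa [stepM, PySem.Dict.keys_empty, PySem.Set.update_empty] using h
  have hnd : m.keys.Nodup := by
    have h := PySem.Dict.nodup_keys_foldl_modify_key ps (fun p => p.1) PySem.Set.empty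
      (fun _ p => (fun s => PySem.Set.add s p.2)) PySem.Dict.empty PySem.Dict.nodup_keys_empty
    rw [hm]
    simpa [stepM] using h
  have hmem : ∀ c l, (l ∈ m.getD c PySem.Set.empty ↔ (c, l) ∈ ps) := by
    intro c l
    rw [hm, mem_getD_foldl_stepM]
    simp [PySem.Dict.getD_empty, PySem.Set.empty]
  have hsn : ∀ c, (m.getD c PySem.Set.empty).Nodup := by
    intro c
    rw [hm]
    exact nodup_getD_foldl_stepM ps _
      (fun c' => by simp [PySem.Dict.getD_empty, PySem.Set.empty]) c
  have hvals : m.values = m.keys.map (fun c => m.getD c PySem.Set.empty) := by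
    rw [PySem.Dict.values, PySem.Dict.items_eq_map_keys m hnd PySem.Set.empty, List.map_map]
    simp [Function.comp]
  have hKmem : ∀ c l, (c, l) ∈ ps → c ∈ m.keys := by
    intro c l hcl
    rw [hK]
    exact (PySem.Set.mem_ofList _ _).mpr (List.mem_map.mpr ⟨(c, l), hcl, rfl⟩)
  -- the per-letter image finsets
  set t : Char → Finset (Char × (Int × Int)) :=
    fun c => (m.getD c PySem.Set.empty).toFinset.image (fun l => (c, l)) with ht
  have hdisj : (↑m.keys.toFinset : Set Char).PairwiseDisjoint t := by
    intro c1 _ c2 _ hne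
    refine Finset.disjoint_left.mpr ?_
    intro x hx1 hx2
    rw [ht] at hx1 hx2
    simp only [Finset.mem_image, List.mem_toFinset] at hx1 hx2
    obtain ⟨l1, -, rfl⟩ := hx1
    obtain ⟨l2, -, h2⟩ := hx2
    exact hne (congrArg Prod.fst h2).symm
  have hbi : m.keys.toFinset.biUnion t = ps.toFinset := by
    ext q
    obtain ⟨c, l⟩ := q
    simp only [Finset.mem_biUnion, ht, Finset.mem_image, List.mem_toFinset]
    constructor
    · rintro ⟨c', -, l', hl', heq⟩
      obtain ⟨rfl, rfl⟩ := Prod.mk.injEq .. ▸ heq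
      exact (hmem _ _).mp hl'
    · intro hcl
      exact ⟨c, hKmem c l hcl, l, (hmem c l).mpr hcl, rfl⟩
  have hsum : (m.values.map PySem.Set.len).sum = ((ps.toFinset.card : Nat) : Int) := by
    rw [hvals, List.map_map]
    have h1 : (m.keys.map (PySem.Set.len ∘ fun c => m.getD c PySem.Set.empty)).sum
        = (((m.keys.map (fun c => (m.getD c PySem.Set.empty).length)).sum : Nat) : Int) := by
      rw [Nat.cast_list_sum, List.map_map]
      rfl
    rw [h1, Nat.cast_inj, ← List.sum_toFinset _ hnd]
    have h2 : ∀ c ∈ m.keys.toFinset,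
        (m.getD c PySem.Set.empty).length = (t c).card := by
      intro c _
      rw [ht]
      rw [Finset.card_image_of_injective _ (fun a b hab => by simpa using hab),
        List.toFinset_card_of_nodup (hsn c)]
    rw [Finset.sum_congr rfl h2, ← Finset.card_biUnion hdisj, hbi]
  have hUnodup : (m.values.foldl (fun s v => PySem.Set.union s v) PySem.Set.empty).Nodup :=
    nodup_foldl_union m.values PySem.Set.empty (by simp [PySem.Set.empty])
  have hU : (m.values.foldl (fun s v => PySem.Set.union s v) PySem.Set.empty).toFinset
      = ps.toFinset.image Prod.snd := by
    ext l
    simp only [List.mem_toFinset, Finset.mem_image, mem_foldl_union, hvals, List.mem_map]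
    constructor
    · rintro (h | ⟨v, ⟨c, -, rfl⟩, hl⟩)
      · simp [PySem.Set.empty] at h
      · exact ⟨(c, l), (hmem c l).mp hl, rfl⟩
    · rintro ⟨⟨c, l'⟩, hq, rfl⟩
      refine Or.inr ⟨m.getD c PySem.Set.empty, ⟨c, ?_, rfl⟩,
        (hmem c l').mpr hq⟩
      exact hKmem c l' hq
  have hjoint : PySem.Set.len (m.values.foldl (fun s v => PySem.Set.union s v) PySem.Set.empty)
      = (((ps.toFinset.image Prod.snd).card : Nat) : Int) := by
    rw [PySem.Set.len, ← List.toFinset_card_of_nodup hUnodup, hU]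
  have hA : satisfied assignment = true ↔
      ps.toFinset.card = (ps.toFinset.image Prod.snd).card := by
    simp only [satisfied]
    rw [hfold, beq_iff_eq, hsum, hjoint, Nat.cast_inj]
  rw [hA, eq_comm, Finset.card_image_iff]
  constructor
  · intro hinj p hp q hq hpq
    exact congrArg Prod.fst (hinj (by simpa using hp) (by simpa using hq) hpq)
  · intro hok x hx y hy hxy
    exact Prod.ext_iff.mpr
      ⟨hok x (by simpa using hx) y (by simpa using hy) hxy, hxy⟩

-- ===== VERDICT (by name: the statement is the Claim_ definition above) =====
theorem satisfied_spec : Claim_equal_satisfied := by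
  intro assignment _
  unfold Spec_satisfied
  rw [Bool.eq_iff_iff, satisfied_iff, satisfied_alt_iff]
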